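-- pv_equiv track=rewrite | github.com/jeongYuri/coding-test-solution | 프로그래머스/2/87946. 피로도/피로도.py | solution
-- ===== SOURCE A (Python) =====
-- from itertools import permutations
--
-- def solution(k, dungeons):
--     answer = 0
--     for order in permutations(dungeons, len(dungeons)):
--         fatigue = k
--         cnt = 0
--         for need, cost in order:
--             if fatigue >= need:
--                 fatigue -= cost
--                 cnt += 1
--             else:
--                 break
--         answer = max(answer, cnt)
--     return answer
-- ===== SOURCE B (Python) =====
-- def solution(k, dungeons):
--     # Backtracking: try each still-available dungeon that the current
--     # fatigue allows, recurse on the rest.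
--     def go(f, rem):
--         best = 0
--         for i in range(len(rem)):
--             need, cost = rem[i]
--             if f >= need:
--                 best = max(best, 1 + go(f - cost, rem[:i] + rem[i + 1:]))
--         return best
--     return go(k, dungeons)
-- ===== Notes on version B (the rewrite author's own statement) =====
-- stated objective: alternative
-- what changed: Replaces full enumeration of all n! permutations (each scanned until the first unaffordable dungeon) by a recursive backtracking search that at each step branches only on the dungeons affordable at the current fatigue.
import Mathlib
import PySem

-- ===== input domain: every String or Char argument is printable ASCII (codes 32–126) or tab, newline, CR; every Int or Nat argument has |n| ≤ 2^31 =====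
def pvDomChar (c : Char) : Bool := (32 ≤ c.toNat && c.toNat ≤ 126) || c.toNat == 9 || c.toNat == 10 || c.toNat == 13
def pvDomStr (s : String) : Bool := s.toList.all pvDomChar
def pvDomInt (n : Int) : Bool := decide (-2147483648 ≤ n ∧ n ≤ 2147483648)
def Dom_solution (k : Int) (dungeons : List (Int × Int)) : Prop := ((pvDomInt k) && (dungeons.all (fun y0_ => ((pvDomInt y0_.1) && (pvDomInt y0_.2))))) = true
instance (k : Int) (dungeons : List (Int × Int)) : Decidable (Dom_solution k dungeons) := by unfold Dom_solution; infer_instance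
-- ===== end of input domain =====

-- B replaces A's full enumeration of all n! permutations by a recursive
-- backtracking search that branches only on dungeons affordable at the current
-- fatigue (alternative decomposition; same worst-case cost).


-- ===== PORT A =====
-- inner loop of A: walks `order`, entering a dungeon while fatigue suffices,
-- stopping (break) at the first unaffordable one; returns the count `cnt`
def runOrder (fatigue cnt : Int) : List (Int × Int) → Int
  | [] => cnt
  | (need, cost) :: rest =>
      if fatigue ≥ need then runOrder (fatigue - cost) (cnt + 1) rest else cnt

def solution (k : Int) (dungeons : List (Int × Int)) : Int :=
  (PySem.List.permutations dungeons dungeons.length).foldl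
    (fun answer order => max answer (runOrder k 0 order)) 0

-- ===== PORT B =====
-- Source B's go(f, rem): the Nat fuel (= rem.length at every call) is only a
-- totality device; each recursive call removes one element of rem
def goAux (f : Int) (rem : List (Int × Int)) : Nat → Int
  | 0 => 0
  | n + 1 =>
      (List.range rem.length).foldl
        (fun best i =>
          match rem[i]? with
          | some (need, cost) =>
              if f ≥ need then max best (1 + goAux (f - cost) (rem.eraseIdx i) n) else best
          | none => best) 0

def solution_alt (k : Int) (dungeons : List (Int × Int)) : Int :=
  goAux k dungeons dungeons.length

-- ===== PRECONDITION & SPEC =====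
def Spec_solution (k : Int) (dungeons : List (Int × Int)) (out : Int) : Prop := out = solution_alt k dungeons
instance (k : Int) (dungeons : List (Int × Int)) (out : Int) : Decidable (Spec_solution k dungeons out) := by unfold Spec_solution; infer_instance

-- ===== CLAIM (what is proved, stated in full; the proofs are below) =====
def Claim_equal_solution : Prop := ∀ (k : Int) (dungeons : List (Int × Int)), Dom_solution k dungeons → Spec_solution k dungeons (solution k dungeons)

-- ===== LEMMAS AND PROOFS =====

-- cnt is a pure offset in A's inner loop
theorem runOrder_offset (xs : List (Int × Int)) :
    ∀ f c, runOrder f c xs = c + runOrder f 0 xs := by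
  induction xs with
  | nil => intro f c; simp [runOrder]
  | cons hd tl ih =>
      intro f c
      obtain ⟨need, cost⟩ := hd
      simp only [runOrder]
      split_ifs with h
      · rw [ih (f - cost) (c + 1), ih (f - cost) (0 + 1)]; ring
      · simp

-- Python's permutations(xs, len(xs)) is never empty
theorem perms_ne_nil : ∀ (n : Nat) (xs : List (Int × Int)), xs.length = n →
    PySem.List.permutations xs n ≠ [] := by
  intro n
  induction n with
  | zero => intro xs _; simp [PySem.List.permutations]
  | succ n ih =>
      intro xs hlen
      have hx : 0 < xs.length := by omega
      simp only [PySem.List.permutations]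
      intro hcontra
      have h0 : (0 : Nat) ∈ List.range xs.length := by simpa using hx
      have := List.flatMap_eq_nil_iff.mp hcontra _ h0
      rcases hget : xs[0]? with _ | a
      · rw [List.getElem?_eq_none_iff] at hget; omega
      · rw [hget] at this
        simp only [List.map_eq_nil_iff] at this
        exact ih (xs.eraseIdx 0) (by simp [hlen]) this

-- folding max of a constant over a nonempty list
theorem foldl_max_const {α : Type} (c : Int) :
    ∀ (L : List α), L ≠ [] → ∀ acc, L.foldl (fun a _ => max a c) acc = max acc c := by
  intro L
  induction L with
  | nil => intro h; exact absurd rfl h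
  | cons x xs ih =>
      intro _ acc
      rcases xs with _ | ⟨y, ys⟩
      · simp
      · rw [List.foldl_cons, ih (by simp) (max acc c), max_assoc, max_self]

-- pulling the accumulator out of a max-fold
theorem foldl_max_pull {α : Type} (t : α → Int) :
    ∀ (L : List α) (a b : Int),
      L.foldl (fun x y => max x (t y)) (max a b) = max a (L.foldl (fun x y => max x (t y)) b) := by
  intro L
  induction L with
  | nil => intro a b; simp
  | cons x xs ih =>
      intro a b
      simp only [List.foldl_cons]
      rw [max_assoc, ih]

-- a constant additive shift moves through a max-fold
theorem foldl_max_shift {α : Type} (t : α → Int) (c : Int) :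
    ∀ (L : List α) (b : Int),
      L.foldl (fun x y => max x (c + t y)) (c + b) = c + L.foldl (fun x y => max x (t y)) b := by
  intro L
  induction L with
  | nil => intro b; simp
  | cons x xs ih =>
      intro b
      simp only [List.foldl_cons]
      rw [show max (c + b) (c + t x) = c + max b (t x) by omega, ih]

-- the key fold identity: max-fold of (c + t ·) over a nonempty list, from any accumulator
theorem foldl_max_key {α : Type} (t : α → Int) (c : Int) (L : List α) (hL : L ≠ [])
    (ht : ∀ y ∈ L, 0 ≤ t y) (acc : Int) :
    L.foldl (fun x y => max x (c + t y)) acc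
      = max acc (c + L.foldl (fun x y => max x (t y)) 0) := by
  rcases L with _ | ⟨i, is⟩
  · exact absurd rfl hL
  · simp only [List.foldl_cons]
    rw [foldl_max_pull, foldl_max_shift,
        show max 0 (t i) = t i from max_eq_right (ht i (by simp))]

-- B's guarded fold step agrees with the pure max-fold step (from a nonneg accumulator)
theorem foldl_guard_eq_max {α : Type} (cond : α → Prop) [DecidablePred cond] (g : α → Int) :
    ∀ (L : List α) (b : Int), 0 ≤ b →
      L.foldl (fun best i => if cond i then max best (1 + g i) else best) b
        = L.foldl (fun x y => max x (if cond y then 1 + g y else 0)) b := by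
  intro L
  induction L with
  | nil => intro b _; rfl
  | cons x xs ih =>
      intro b hb
      simp only [List.foldl_cons]
      by_cases h : cond x
      · simp only [if_pos h]; exact ih _ (le_trans hb (le_max_left _ _))
      · simp only [if_neg h, max_eq_left hb]
        exact ih _ hb

-- goAux never returns a negative count
theorem goAux_nonneg (n : Nat) : ∀ (f : Int) (rem : List (Int × Int)), 0 ≤ goAux f rem n := by
  induction n with
  | zero => intro f rem; simp [goAux]
  | succ n _ =>
      intro f rem
      simp only [goAux]
      have : ∀ (L : List Nat) (b : Int), 0 ≤ b →
          0 ≤ L.foldl (fun best i =>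
            match rem[i]? with
            | some (need, cost) =>
                if f ≥ need then max best (1 + goAux (f - cost) (rem.eraseIdx i) n) else best
            | none => best) b := by
        intro L
        induction L with
        | nil => intro b hb; exact hb
        | cons x xs ihL =>
            intro b hb
            simp only [List.foldl_cons]
            apply ihL
            rcases rem[x]? with _ | ⟨need, cost⟩
            · exact hb
            · dsimp only
              split_ifs with h
              · exact le_trans hb (le_max_left _ _)
              · exact hb
      exact this _ 0 le_rfl

-- MAIN: A's max over all permutations equals B's backtracking value
theorem main_lemma : ∀ (n : Nat) (xs : List (Int × Int)) (f c acc : Int), xs.length = n →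
    (PySem.List.permutations xs n).foldl (fun a p => max a (c + runOrder f 0 p)) acc
      = max acc (c + goAux f xs n) := by
  intro n
  induction n with
  | zero =>
      intro xs f c acc _
      simp [PySem.List.permutations, goAux, runOrder]
  | succ n ih =>
      intro xs f c acc hlen
      have hx : 0 < xs.length := by omega
      have hperm : PySem.List.permutations xs (n + 1)
          = (List.range xs.length).flatMap (fun i =>
              match xs[i]? with
              | none => ([] : List (List (Int × Int)))
              | some x => (PySem.List.permutations (xs.eraseIdx i) n).map (fun p => x :: p)) := by
        simp only [PySem.List.permutations]
        congr 1
        funext i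
        rcases xs[i]? with _ | a <;> rfl
      have hgo : goAux f xs (n + 1)
          = (List.range xs.length).foldl
              (fun best i =>
                match xs[i]? with
                | some (need, cost) =>
                    if f ≥ need then max best (1 + goAux (f - cost) (xs.eraseIdx i) n) else best
                | none => best) 0 := rfl
      rw [hperm, hgo, List.foldl_flatMap]
      set t : Nat → Int := fun i =>
        if f ≥ ((xs[i]?).getD (0, 0)).1 then
          1 + goAux (f - ((xs[i]?).getD (0, 0)).2) (xs.eraseIdx i) n
        else 0 with ht_def
      have hbranch : ∀ (a : Int), ∀ i ∈ List.range xs.length,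
          (match xs[i]? with
            | none => ([] : List (List (Int × Int)))
            | some x => (PySem.List.permutations (xs.eraseIdx i) n).map (fun p => x :: p)).foldl
              (fun a p => max a (c + runOrder f 0 p)) a
            = max a (c + t i) := by
        intro a i hi
        have hi' : i < xs.length := List.mem_range.mp hi
        have hget : xs[i]? = some xs[i] := List.getElem?_eq_getElem hi'
        rcases hxi : xs[i] with ⟨need, cost⟩
        have hrest : (xs.eraseIdx i).length = n := by rw [List.length_eraseIdx_of_lt hi']; omega
        rw [hget, hxi]
        dsimp only
        rw [List.foldl_map]
        simp only [ht_def, hget, hxi, Option.getD_some]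
        by_cases hfe : f ≥ need
        · rw [PySem.List.foldl_congr_mem _ _
              (fun a' p => max a' ((c + 1) + runOrder (f - cost) 0 p)) a
              (by
                intro a' p _
                simp only [runOrder, if_pos hfe, runOrder_offset p (f - cost) (0 + 1)]
                omega)]
          rw [ih (xs.eraseIdx i) (f - cost) (c + 1) a hrest, if_pos hfe]
          omega
        · rw [PySem.List.foldl_congr_mem _ _ (fun a' _ => max a' c) a
              (by
                intro a' p _
                simp only [runOrder, if_neg hfe]
                omega)]
          rw [foldl_max_const c _ (perms_ne_nil n _ hrest) a, if_neg hfe]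
          omega
      refine (PySem.List.foldl_congr_mem _ _ (fun a i => max a (c + t i)) acc hbranch).trans ?_
      have ht_nonneg : ∀ i ∈ List.range xs.length, 0 ≤ t i := by
        intro i _
        simp only [ht_def]
        split_ifs with h
        · have := goAux_nonneg n (f - ((xs[i]?).getD (0, 0)).2) (xs.eraseIdx i)
          omega
        · exact le_rfl
      rw [foldl_max_key t c _ (by simp [List.range_eq_nil, hlen]) ht_nonneg acc]
      have hB : (List.range xs.length).foldl
          (fun best i =>
            match xs[i]? with
            | some (need, cost) =>
                if f ≥ need then max best (1 + goAux (f - cost) (xs.eraseIdx i) n) else best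
            | none => best) 0
          = (List.range xs.length).foldl (fun a i => max a (t i)) 0 := by
        rw [PySem.List.foldl_congr_mem _ _
            (fun best i =>
              if f ≥ ((xs[i]?).getD (0, 0)).1 then
                max best (1 + goAux (f - ((xs[i]?).getD (0, 0)).2) (xs.eraseIdx i) n)
              else best) 0
            (by
              intro a i hi
              have hi' : i < xs.length := List.mem_range.mp hi
              have hget : xs[i]? = some xs[i] := List.getElem?_eq_getElem hi'
              rcases hxi : xs[i] with ⟨need, cost⟩
              simp [hget, hxi])]
        rw [foldl_guard_eq_max (fun i => f ≥ ((xs[i]?).getD (0, 0)).1)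
              (fun i => goAux (f - ((xs[i]?).getD (0, 0)).2) (xs.eraseIdx i) n) _ 0 le_rfl]
      rw [hB]

-- ===== VERDICT (by name: the statement is the Claim_ definition above) =====
theorem solution_spec : Claim_equal_solution := by
  intro k dungeons _
  unfold Spec_solution solution solution_alt
  rw [PySem.List.foldl_congr_mem _ _ (fun a p => max a (0 + runOrder k 0 p)) 0
        (by intro a p _; simp)]
  rw [main_lemma dungeons.length dungeons k 0 0 rfl]
  have := goAux_nonneg dungeons.length k dungeons
  omega
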